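-- pv_equiv track=rewrite | github.com/michele23z/General-Works-Set | object_scacchiera.py | diagonale
-- ===== SOURCE A (Python) =====
-- def diagonale(x, y, lista):
--     x = x, y
--     for el in lista:
--         if abs(x[0] - el[0]) == abs(x[1] - el[1]):
--             return True
--         else:
--             pass
--     return False
-- ===== SOURCE B (Python) =====
-- def diagonale(x, y, lista):
--     diffs = {a - b for (a, b) in lista}
--     sums = {a + b for (a, b) in lista}
--     return (x - y) in diffs or (x + y) in sums
-- ===== Notes on version B (the rewrite author's own statement) =====
-- stated objective: alternative
-- what changed: Replaces the element-by-element early-return scan over lista with building the sets of diagonal keys (coordinate differences and sums) and deciding by two membership tests, using |x-a|==|y-b| iff x-y=a-b or x+y=a+b.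
import Mathlib
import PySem

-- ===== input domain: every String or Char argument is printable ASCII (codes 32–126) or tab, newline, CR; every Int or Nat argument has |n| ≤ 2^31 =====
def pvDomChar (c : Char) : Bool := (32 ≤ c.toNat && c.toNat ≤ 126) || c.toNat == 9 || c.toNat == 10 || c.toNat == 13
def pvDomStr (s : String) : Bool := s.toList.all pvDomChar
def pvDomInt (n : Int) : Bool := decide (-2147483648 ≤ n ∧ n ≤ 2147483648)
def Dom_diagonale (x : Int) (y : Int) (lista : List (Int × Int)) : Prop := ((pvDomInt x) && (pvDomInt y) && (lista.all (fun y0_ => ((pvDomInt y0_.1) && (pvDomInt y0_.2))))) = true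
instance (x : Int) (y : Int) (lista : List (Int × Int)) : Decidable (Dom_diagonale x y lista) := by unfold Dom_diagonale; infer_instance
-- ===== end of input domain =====

-- B replaces A's early-return scan with two precomputed sets of diagonal keys
-- (coordinate differences and sums) and two membership tests; same O(n) cost.

-- ===== PORT A =====
-- A's loop: return True on the first element with |x-el[0]| == |y-el[1]|, else False.
def diagonale (x : Int) (y : Int) (lista : List (Int × Int)) : Bool :=
  match lista with
  | [] => false
  | el :: rest => if |x - el.1| = |y - el.2| then true else diagonale x y rest

-- ===== PORT B =====
def diagonale_alt (x : Int) (y : Int) (lista : List (Int × Int)) : Bool :=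
  let diffs : PySem.Set Int := PySem.Set.ofList (lista.map (fun e => e.1 - e.2))
  let sums : PySem.Set Int := PySem.Set.ofList (lista.map (fun e => e.1 + e.2))
  PySem.Set.contains diffs (x - y) || PySem.Set.contains sums (x + y)

-- ===== PRECONDITION & SPEC =====
def Spec_diagonale (x : Int) (y : Int) (lista : List (Int × Int)) (out : Bool) : Prop := out = diagonale_alt x y lista
instance (x : Int) (y : Int) (lista : List (Int × Int)) (out : Bool) : Decidable (Spec_diagonale x y lista out) := by unfold Spec_diagonale; infer_instance

-- ===== CLAIM (what is proved, stated in full; the proofs are below) =====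
def Claim_equal_diagonale : Prop := ∀ (x : Int) (y : Int) (lista : List (Int × Int)), Dom_diagonale x y lista → Spec_diagonale x y lista (diagonale x y lista)

-- ===== LEMMAS AND PROOFS =====

theorem diagonale_eq_decide (x y : Int) (lista : List (Int × Int)) :
    diagonale x y lista = decide (∃ e ∈ lista, |x - e.1| = |y - e.2|) := by
  induction lista with
  | nil => simp [diagonale]
  | cons el rest ih =>
      simp only [diagonale, ih]
      by_cases h : |x - el.1| = |y - el.2| <;> simp [h]

theorem diagonale_alt_eq_decide (x y : Int) (lista : List (Int × Int)) :
    diagonale_alt x y lista =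
      decide (∃ e ∈ lista, x - y = e.1 - e.2 ∨ x + y = e.1 + e.2) := by
  rw [Bool.eq_iff_iff]
  simp only [diagonale_alt, Bool.or_eq_true, PySem.Set.contains_iff,
    PySem.Set.mem_ofList, List.mem_map, decide_eq_true_eq]
  constructor
  · rintro (⟨e, he, h⟩ | ⟨e, he, h⟩)
    · exact ⟨e, he, Or.inl h.symm⟩
    · exact ⟨e, he, Or.inr h.symm⟩
  · rintro ⟨e, he, h | h⟩
    · exact Or.inl ⟨e, he, h.symm⟩
    · exact Or.inr ⟨e, he, h.symm⟩

theorem abs_key (x y a b : Int) :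
    (|x - a| = |y - b|) ↔ (x - y = a - b ∨ x + y = a + b) := by
  rw [abs_eq_abs]; omega

-- ===== VERDICT (by name: the statement is the Claim_ definition above) =====
theorem diagonale_spec : Claim_equal_diagonale := by
  intro x y lista _
  unfold Spec_diagonale
  rw [diagonale_eq_decide, diagonale_alt_eq_decide]
  congr 1
  simp only [abs_key]
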